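-- pv_equiv track=rewrite | github.com/JKay15/oj_auto_uploader | oj_prob_inserter.py | add_id
-- ===== SOURCE A (Python) =====
-- def add_id(id):
--     l=len(id)
--     i=l-1
--     while i>=0 and id[i]=='Z':
--         i-=1
--     if i<0:
--         id='A'*(l+1)
--     else:
--         id=id[:i]+chr(ord(id[i])+1)+'A'*(l-i-1)
--     return id
-- ===== SOURCE B (Python) =====
-- def add_id(id):
--     out = []
--     carry = 1
--     for ch in reversed(id):
--         if carry:
--             if ch == 'Z':
--                 out.append('A')
--             else:
--                 out.append(chr(ord(ch) + 1))
--                 carry = 0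
--         else:
--             out.append(ch)
--     if carry:
--         out.append('A')
--     return ''.join(reversed(out))
-- ===== Notes on version B (the rewrite author's own statement) =====
-- stated objective: alternative
-- what changed: Replaces A's scan-for-last-non-Z index plus slice-and-rebuild with a single right-to-left add-one-with-carry pass that emits output characters directly.
import Mathlib
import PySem

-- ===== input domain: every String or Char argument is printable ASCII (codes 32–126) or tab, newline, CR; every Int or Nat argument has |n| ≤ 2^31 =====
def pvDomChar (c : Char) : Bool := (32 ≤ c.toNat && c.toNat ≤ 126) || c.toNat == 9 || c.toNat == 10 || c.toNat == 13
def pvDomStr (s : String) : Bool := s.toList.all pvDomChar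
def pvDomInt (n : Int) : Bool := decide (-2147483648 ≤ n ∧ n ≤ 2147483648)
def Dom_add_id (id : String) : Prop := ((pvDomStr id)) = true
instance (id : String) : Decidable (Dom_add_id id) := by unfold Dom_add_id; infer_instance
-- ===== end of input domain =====

-- B differs from A only in algorithmic structure (carry propagation vs index scan + slice rebuild); same return value everywhere.

-- ===== PORT A =====
-- while i>=0 and id[i]=='Z': i-=1   (id[i] is always in range when read, so pyGetD's default is never used)
def whileZ (s : List Char) (i : Int) : Int :=
  if h : 0 ≤ i ∧ PySem.List.pyGetD s i 'A' = 'Z' then whileZ s (i - 1) else i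
termination_by (i + 1).toNat
decreasing_by omega

-- body of A on the character list
def addList (cs : List Char) : List Char :=
  let l : Int := cs.length
  let i := whileZ cs (l - 1)
  if i < 0 then List.replicate (l + 1).toNat 'A'
  else PySem.List.slice cs none (some i)
       ++ Char.ofNat ((PySem.List.pyGetD cs i 'A').toNat + 1)
       :: List.replicate (l - i - 1).toNat 'A'

def add_id (id : String) : String := String.mk (addList id.toList)

-- ===== PORT B =====
-- out-list of the for-loop over the reversed string, with the carry flag; trailing ['A'] is the post-loop append
def bLoop : List Char → Bool → List Char
  | [], carry => if carry then ['A'] else []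
  | c :: rest, carry =>
      if carry then
        if c = 'Z' then 'A' :: bLoop rest true
        else Char.ofNat (c.toNat + 1) :: bLoop rest false
      else c :: bLoop rest false

def add_id_alt (id : String) : String := String.mk (bLoop id.toList.reverse true).reverse

-- ===== PRECONDITION & SPEC =====
def Spec_add_id (id : String) (out : String) : Prop := out = add_id_alt id
instance (id : String) (out : String) : Decidable (Spec_add_id id out) := by unfold Spec_add_id; infer_instance

-- ===== CLAIM (what is proved, stated in full; the proofs are below) =====
def Claim_equal_add_id : Prop := ∀ (id : String), Dom_add_id id → Spec_add_id id (add_id id)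

-- ===== LEMMAS AND PROOFS =====

theorem whileZ_le (s : List Char) (i : Int) : whileZ s i ≤ i := by
  rw [whileZ]
  split
  · have := whileZ_le s (i - 1)
    omega
  · omega
termination_by (i + 1).toNat
decreasing_by omega

theorem pyGetD_append_left (xs ys : List Char) (i : Int) (d : Char)
    (h0 : 0 ≤ i) (h1 : i < (xs.length : Int)) :
    PySem.List.pyGetD (xs ++ ys) i d = PySem.List.pyGetD xs i d := by
  rw [PySem.List.pyGetD_eq_getElem (xs ++ ys) d h0 (by simp; omega),
      PySem.List.pyGetD_eq_getElem xs d h0 h1]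
  exact List.getElem_append_left (by omega)

theorem whileZ_append (xs : List Char) (z : Char) (i : Int)
    (hi : i < (xs.length : Int)) :
    whileZ (xs ++ [z]) i = whileZ xs i := by
  by_cases h0 : 0 ≤ i
  · have hpg := pyGetD_append_left xs [z] i 'A' h0 hi
    conv_lhs => rw [whileZ]
    conv_rhs => rw [whileZ]
    rw [hpg]
    by_cases hz : PySem.List.pyGetD xs i 'A' = 'Z'
    · rw [dif_pos ⟨h0, hz⟩, dif_pos ⟨h0, hz⟩]
      exact whileZ_append xs z (i - 1) (by omega)
    · rw [dif_neg (by tauto), dif_neg (by tauto)]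
  · conv_lhs => rw [whileZ]
    conv_rhs => rw [whileZ]
    rw [dif_neg (by rintro ⟨h, -⟩; omega), dif_neg (by rintro ⟨h, -⟩; omega)]
termination_by (i + 1).toNat
decreasing_by omega

theorem whileZ_neg_one (s : List Char) : whileZ s (-1) = -1 := by
  rw [whileZ, dif_neg (by rintro ⟨h, -⟩; omega)]

theorem addList_nil : addList [] = ['A'] := by
  simp [addList, whileZ_neg_one]

theorem addList_append_notZ (xs : List Char) (c : Char) (hc : c ≠ 'Z') :
    addList (xs ++ [c]) = xs ++ [Char.ofNat (c.toNat + 1)] := by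
  unfold addList
  have hidx : (((xs ++ [c]).length : Int) - 1) = ((xs.length : Nat) : Int) := by simp
  have hget : PySem.List.pyGetD (xs ++ [c]) ((xs.length : Nat) : Int) 'A' = c := by
    rw [PySem.List.pyGetD_eq_getElem (xs ++ [c]) 'A' (by omega) (by simp)]
    simp
  have hw : whileZ (xs ++ [c]) (((xs ++ [c]).length : Int) - 1) = ((xs.length : Nat) : Int) := by
    rw [hidx, whileZ, dif_neg (by rintro ⟨-, h2⟩; exact hc (hget ▸ h2))]
  simp only [hw]
  rw [if_neg (by omega)]
  rw [PySem.List.slice_to_natCast, hget]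
  have hz : (((xs ++ [c]).length : Int) - ((xs.length : Nat) : Int) - 1).toNat = 0 := by
    simp
  rw [hz]
  simp

theorem addList_append_Z (xs : List Char) :
    addList (xs ++ ['Z']) = addList xs ++ ['A'] := by
  unfold addList
  have hstep : whileZ (xs ++ ['Z']) (((xs ++ ['Z']).length : Int) - 1)
      = whileZ xs ((xs.length : Int) - 1) := by
    have hget : PySem.List.pyGetD (xs ++ ['Z']) (((xs ++ ['Z']).length : Int) - 1) 'A' = 'Z' := by
      rw [show (((xs ++ ['Z']).length : Int) - 1) = ((xs.length : Nat) : Int) by simp]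
      rw [PySem.List.pyGetD_eq_getElem (xs ++ ['Z']) 'A' (by omega) (by simp)]
      simp
    rw [whileZ, dif_pos ⟨by simp, hget⟩]
    rw [show (((xs ++ ['Z']).length : Int) - 1 - 1) = ((xs.length : Int) - 1) by simp]
    exact whileZ_append xs 'Z' _ (by omega)
  simp only [hstep]
  have hle := whileZ_le xs ((xs.length : Int) - 1)
  by_cases hneg : whileZ xs ((xs.length : Int) - 1) < 0
  · rw [if_pos hneg, if_pos hneg]
    rw [show (((xs ++ ['Z']).length : Int) + 1).toNat = ((xs.length : Int) + 1).toNat + 1 by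
      simp; omega]
    rw [List.replicate_succ']
  · rw [if_neg hneg, if_neg hneg]
    set i := whileZ xs ((xs.length : Int) - 1) with hi
    have h0 : 0 ≤ i := by omega
    have h1 : i < (xs.length : Int) := by omega
    rw [pyGetD_append_left xs ['Z'] i 'A' h0 h1]
    rw [show PySem.List.slice (xs ++ ['Z']) none (some i) = PySem.List.slice xs none (some i) by
      rw [PySem.List.slice_to _ h0, PySem.List.slice_to _ h0]
      rw [List.take_append_of_le_length (by omega)]]
    rw [show (((xs ++ ['Z']).length : Int) - i - 1).toNat = ((xs.length : Int) - i - 1).toNat + 1 by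
      simp; omega]
    rw [List.replicate_succ']
    simp

theorem bLoop_false (t : List Char) : bLoop t false = t := by
  induction t with
  | nil => rfl
  | cons c t ih => simp [bLoop, ih]

theorem main_lemma (r : List Char) : addList r.reverse = (bLoop r true).reverse := by
  induction r with
  | nil => simpa using addList_nil
  | cons c t ih =>
    by_cases hc : c = 'Z'
    · subst hc
      simp only [List.reverse_cons, bLoop, if_pos trivial]
      rw [addList_append_Z, ih]
    · simp only [List.reverse_cons, bLoop, if_neg hc, if_pos trivial]
      rw [addList_append_notZ _ _ hc, bLoop_false]

-- ===== VERDICT (by name: the statement is the Claim_ definition above) =====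
theorem add_id_spec : Claim_equal_add_id := by
  intro id _
  unfold Spec_add_id add_id add_id_alt
  rw [← main_lemma id.toList.reverse, List.reverse_reverse]
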